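-- pv_equiv track=rewrite | github.com/s1nbo/CodingInterviewPractice | Python/3495.py | helper
-- ===== SOURCE A (Python) =====
-- def helper(n: int) -> int:
--     if n <= 0:
--         return 0
--     ans = 0
--     base = 1 # number of reductions our numbers currently need to reach zero (1,2,3, ...)
--     l = 1 # 4**(base-1)
--     while l <= n:
--         r = l*4 - 1 # 4**base - 1
--         # Every number in the range [l, r] needs 'base' operations to reach zero
--
--         # How many numbers from [l, r] are <= n?
--         count = min(r, n) - l + 1
--         ans += count * base
--
--         # Next base and range
--         base += 1
--         l *= 4
--
--     return ans
-- ===== SOURCE B (Python) =====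
-- def helper(n: int) -> int:
--     if n <= 0:
--         return 0
--     # d = number of base-4 digits of n (= reductions n itself needs)
--     d = 0
--     t = n
--     while t > 0:
--         t //= 4
--         d += 1
--     # sum_{k=1}^{n} len4(k) = (n+1)*d - (4^d - 1)/3
--     return (n + 1) * d - (4 ** d - 1) // 3
-- ===== Notes on version B (the rewrite author's own statement) =====
-- stated objective: simpler
-- what changed: B replaces A's bucket loop (accumulating count*base per base-4 range) by one digit-count loop plus the closed form (n+1)*d - (4^d-1)//3.
import Mathlib
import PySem

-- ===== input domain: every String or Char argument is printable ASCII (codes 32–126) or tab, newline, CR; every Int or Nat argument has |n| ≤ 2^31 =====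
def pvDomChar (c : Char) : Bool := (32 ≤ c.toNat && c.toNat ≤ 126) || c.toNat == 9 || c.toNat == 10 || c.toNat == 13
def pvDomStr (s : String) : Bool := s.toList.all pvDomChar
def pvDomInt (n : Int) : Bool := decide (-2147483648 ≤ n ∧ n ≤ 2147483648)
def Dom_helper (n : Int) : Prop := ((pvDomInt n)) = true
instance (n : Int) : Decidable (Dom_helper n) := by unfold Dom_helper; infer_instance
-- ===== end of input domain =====

-- B computes the same total by a closed form from the base-4 digit count instead of A's bucket loop (objective: simpler).

-- ===== PORT A =====
-- the while loop of A; `hl : 0 < l` records the invariant (l starts at 1, is multiplied by 4)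
-- needed only for termination, the computation is A's step for step
def helperLoop (n l base ans : Int) (hl : 0 < l) : Int :=
  if h : l ≤ n then
    helperLoop n (l * 4) (base + 1) (ans + (min (l * 4 - 1) n - l + 1) * base) (by omega)
  else ans
termination_by (n + 1 - l).toNat
decreasing_by omega

def helper (n : Int) : Int :=
  if n ≤ 0 then 0 else helperLoop n 1 1 0 (by norm_num)

-- ===== PORT B =====
-- the `while t > 0: t //= 4; d += 1` loop of B
def helperAltDigits (t : Int) : Int :=
  if h : 0 < t then helperAltDigits (PySem.Int.floordiv t 4) + 1 else 0
termination_by t.toNat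
decreasing_by
  rw [PySem.Int.floordiv_eq_ediv_of_pos (by norm_num)]
  omega

-- `4 ** d` with d = the (nonnegative) digit count ports as `4 ^ d.toNat`
def helper_alt (n : Int) : Int :=
  if n ≤ 0 then 0
  else (n + 1) * helperAltDigits n - PySem.Int.floordiv (4 ^ (helperAltDigits n).toNat - 1) 3

-- ===== PRECONDITION & SPEC =====
def Spec_helper (n : Int) (out : Int) : Prop := out = helper_alt n
instance (n : Int) (out : Int) : Decidable (Spec_helper n out) := by unfold Spec_helper; infer_instance

-- ===== CLAIM (what is proved, stated in full; the proofs are below) =====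
def Claim_equal_helper : Prop := ∀ (n : Int), Dom_helper n → Spec_helper n (helper n)

-- ===== LEMMAS AND PROOFS =====

-- geometric sum 1 + 4 + … + 4^(k-1), so that no division appears in the proofs
def gsum : Nat → Int
  | 0 => 0
  | k + 1 => gsum k + 4 ^ k

theorem gsum_mul_three (k : Nat) : (4 : Int) ^ k - 1 = 3 * gsum k := by
  induction k with
  | zero => simp [gsum]
  | succ k ih => rw [gsum, pow_succ]; linarith

theorem digits_pow (b : Nat) : ∀ k : Int, 4 ^ b ≤ k → k < 4 ^ (b + 1) → helperAltDigits k = (b : Int) + 1 := by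
  induction b with
  | zero =>
    intro k h1 h2
    have h1' : (1:Int) ≤ k := by simpa using h1
    have h2' : k < 4 := by simpa using h2
    rw [helperAltDigits, dif_pos (by omega : (0:Int) < k), PySem.Int.floordiv_eq_ediv_of_pos (by norm_num)]
    rw [Int.ediv_eq_zero_of_lt (by omega) (by omega)]
    rw [helperAltDigits]; simp
  | succ b ih =>
    intro k h1 h2
    have hpow : (0:Int) < 4 ^ (b+1) := by positivity
    rw [helperAltDigits, dif_pos (by omega), PySem.Int.floordiv_eq_ediv_of_pos (by norm_num)]
    have hdm := Int.mul_ediv_add_emod k 4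
    have hr0 : 0 ≤ k % 4 := Int.emod_nonneg k (by norm_num)
    have hr4 : k % 4 < 4 := Int.emod_lt_of_pos k (by norm_num)
    have hs1 : (4:Int) ^ (b+1) = 4 ^ b * 4 := pow_succ 4 b
    have hs2 : (4:Int) ^ (b+2) = 4 ^ b * 4 * 4 := by rw [pow_succ, pow_succ]
    have hlo : (4:Int) ^ b ≤ k / 4 := by rw [hs1] at h1; omega
    have hhi : k / 4 < 4 ^ (b+1) := by rw [hs2] at h2; rw [hs1]; omega
    rw [ih (k / 4) hlo hhi]
    push_cast; ring_nf

theorem helperLoop_congr (n l l' base base' ans : Int) (h : l = l') (hb : base = base') (hl : 0 < l) :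
    helperLoop n l base ans hl = helperLoop n l' base' ans (h ▸ hl) := by
  subst h; subst hb; rfl

theorem loop_closed (e : Nat) : ∀ (b : Nat) (n ans : Int) (hl : 0 < (4:Int) ^ b),
    4 ^ (b + e) ≤ n → n < 4 ^ (b + e + 1) →
    helperLoop n (4 ^ b) ((b : Int) + 1) ans hl
      = ans + (n + 1) * ((b : Int) + e + 1) - (gsum (b + e + 1) - gsum b) - b * 4 ^ b := by
  induction e with
  | zero =>
    intro b n ans hl h1 h2
    have hle : (4:Int) ^ b ≤ n := by simpa using h1
    have hs : (4:Int) ^ (b + 1) = 4 ^ b * 4 := pow_succ 4 b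
    rw [helperLoop, dif_pos hle, helperLoop, dif_neg (by rw [Nat.add_zero] at h2; omega)]
    rw [min_eq_right (by rw [Nat.add_zero] at h2; rw [hs] at h2; omega)]
    simp only [gsum]
    push_cast; ring_nf
  | succ e ih =>
    intro b n ans hl h1 h2
    have hs : (4:Int) ^ (b + 1) = 4 ^ b * 4 := pow_succ 4 b
    have hle : (4:Int) ^ b ≤ n := le_trans (pow_le_pow_right₀ (by norm_num) (by omega)) h1
    have hle1 : (4:Int) ^ (b + 1) ≤ n := le_trans (pow_le_pow_right₀ (by norm_num) (by omega)) h1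
    rw [helperLoop, dif_pos hle]
    rw [helperLoop_congr n (4^b*4) (4^(b+1)) ((b:Int)+1+1) (((b+1:Nat) : Int)+1) _ hs.symm (by push_cast; ring) _]
    have hA : (4:Int) ^ (b+1+e) ≤ n := by have hx : b+1+e = b+(e+1) := by omega
                                          rw [hx]; exact h1
    have hB : n < (4:Int) ^ (b+1+e+1) := by have hx : b+1+e+1 = b+(e+1)+1 := by omega
                                            rw [hx]; exact h2
    rw [ih (b+1) n _ _ hA hB]
    rw [min_eq_left (by rw [hs] at hle1; omega)]
    have hidx : b + 1 + e + 1 = b + (e + 1) + 1 := by omega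
    rw [hidx]
    have hg : gsum (b + 1) = gsum b + 4 ^ b := rfl
    rw [hg, hs]
    push_cast; ring_nf

-- ===== VERDICT (by name: the statement is the Claim_ definition above) =====
theorem helper_spec : Claim_equal_helper := by
  intro n _
  unfold Spec_helper helper helper_alt
  by_cases hn : n ≤ 0
  · simp [hn]
  · simp only [if_neg hn]
    have hn1 : 1 ≤ n := by omega
    -- find e with 4^e ≤ n < 4^(e+1)
    have hm : n.toNat ≠ 0 := by omega
    obtain ⟨e, he1, he2⟩ : ∃ e : Nat, (4:Int) ^ e ≤ n ∧ n < 4 ^ (e + 1) := by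
      refine ⟨Nat.log 4 n.toNat, ?_, ?_⟩
      · have := Nat.pow_log_le_self 4 hm
        have : ((4 ^ Nat.log 4 n.toNat : Nat) : Int) ≤ (n.toNat : Int) := by exact_mod_cast this
        push_cast at this; omega
      · have := Nat.lt_pow_succ_log_self (by norm_num : 1 < 4) n.toNat
        have : ((n.toNat : Nat) : Int) < ((4 ^ (Nat.log 4 n.toNat + 1) : Nat) : Int) := by exact_mod_cast this
        push_cast at this; omega
    have hd : helperAltDigits n = (e : Int) + 1 := digits_pow e n he1 he2
    have hcall := loop_closed e 0 n 0 (by norm_num) (by simpa using he1) (by simpa using he2)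
    rw [show helperLoop n 1 1 0 (by norm_num) = helperLoop n ((4:Int)^0) ((0:Nat) + 1) 0 (by norm_num) from by norm_num]
    rw [hcall, hd]
    have htn : ((e : Int) + 1).toNat = e + 1 := by omega
    rw [htn, gsum_mul_three (e+1), PySem.Int.floordiv_eq_ediv_of_pos (by norm_num),
        Int.mul_ediv_cancel_left _ (by norm_num)]
    simp only [gsum]
    push_cast; ring_nf
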